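-- pv_equiv track=rewrite | github.com/lin72h/gcdx | scripts/dtrace/analyze-m13-vtable.py | infer_slide
-- ===== SOURCE A (Python) =====
-- from collections import Counter
--
-- def infer_slide(vtables: Counter[int], symbols: dict[str, int]) -> int | None:
--     candidates: set[int] = set()
--     known = {
--         name: addr
--         for name, addr in symbols.items()
--         if "vtable" in name and name.startswith("__OS_dispatch_")
--     }
--     known_addrs = set(known.values())
--     for runtime_addr in vtables:
--         if runtime_addr < 0x1000:
--             continue
--         for symbol_addr in known.values():
--             candidates.add(runtime_addr - symbol_addr)
--     if not candidates:
--         return None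
--     scored: Counter[int] = Counter()
--     for candidate in candidates:
--         for runtime_addr, count in vtables.items():
--             if runtime_addr >= 0x1000 and runtime_addr - candidate in known_addrs:
--                 scored[candidate] += count
--     if not scored:
--         return None
--     return scored.most_common(1)[0][0]
-- ===== SOURCE B (Python) =====
-- # B: scores each candidate slide by dict lookups (candidate + known symbol address in
-- # vtables) instead of rescanning all vtable entries per candidate, tracking the running
-- # best in the same pass that enumerates the candidates.
-- def infer_slide(vtables, symbols):
--     known_addrs = [addr for name, addr in symbols.items()
--                    if "vtable" in name and name.startswith("__OS_dispatch_")]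
--     distinct_addrs = list(dict.fromkeys(known_addrs))
--     best = None
--     best_score = 0
--     seen = set()
--     for runtime_addr in vtables:
--         if runtime_addr < 0x1000:
--             continue
--         for a in known_addrs:
--             c = runtime_addr - a
--             if c in seen:
--                 continue
--             seen.add(c)
--             score = sum(vtables.get(c + b, 0) for b in distinct_addrs if c + b >= 0x1000)
--             if best is None or score > best_score:
--                 best, best_score = c, score
--     return best
-- ===== Notes on version B (the rewrite author's own statement) =====
-- stated objective: alternative
-- what changed: B scores each candidate slide with one dict lookup per known symbol address (candidate+addr in vtables) instead of rescanning every vtable entry per candidate, and keeps a running best while enumerating candidates instead of building a Counter and calling most_common; Pre_ excludes only inputs where the maximal score is tied between candidates, on which A's Counter.most_common tie-break follows CPython's accidental set-iteration order (plus the dict-representation invariant that association-list keys are unique).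
import Mathlib
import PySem

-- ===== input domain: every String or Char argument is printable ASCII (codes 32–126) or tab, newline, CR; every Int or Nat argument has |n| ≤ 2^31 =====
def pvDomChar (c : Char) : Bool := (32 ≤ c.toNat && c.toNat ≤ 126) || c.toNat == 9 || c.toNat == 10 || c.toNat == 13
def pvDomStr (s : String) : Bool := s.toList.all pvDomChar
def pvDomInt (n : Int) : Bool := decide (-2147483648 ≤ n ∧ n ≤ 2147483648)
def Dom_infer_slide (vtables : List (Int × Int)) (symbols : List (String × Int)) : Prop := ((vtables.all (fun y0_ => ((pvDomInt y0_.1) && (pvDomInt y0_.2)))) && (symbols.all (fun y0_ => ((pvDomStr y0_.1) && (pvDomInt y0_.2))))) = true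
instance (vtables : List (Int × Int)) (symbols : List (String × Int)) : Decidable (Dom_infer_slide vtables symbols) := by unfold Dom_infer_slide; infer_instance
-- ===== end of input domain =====

-- B scores each candidate slide by dict lookups (candidate + known symbol address) instead of
-- rescanning all vtable entries per candidate, and tracks a running best while enumerating
-- candidates instead of building a Counter and calling most_common (objective: alternative).

-- ===== PORT A =====
-- Transliteration of A.  `for runtime_addr in vtables` iterates the dict's keys, i.e. `p.1`
-- over the item list; `scored[c] += count` is Counter.__getitem__ (default 0) + store, i.e.
-- Dict.modify c 0 (· + count); `scored.most_common(1)[0][0]` is the first-inserted key with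
-- maximal count (heapq.nlargest is stable), i.e. PySem.List.max? over the item list.
def infer_slide (vtables : List (Int × Int)) (symbols : List (String × Int)) : Option Int :=
  let known : PySem.Dict String Int :=
    symbols.foldl (fun d p =>
      if PySem.Str.isIn "vtable" p.1 && PySem.Str.startswith p.1 "__OS_dispatch_"
      then d.insert p.1 p.2 else d) PySem.Dict.empty
  let known_addrs : PySem.Set Int := PySem.Set.ofList known.values
  let candidates : PySem.Set Int :=
    vtables.foldl (fun s p =>
      if p.1 < 4096 then s
      else known.values.foldl (fun s a => PySem.Set.add s (p.1 - a)) s) PySem.Set.empty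
  if candidates = [] then none
  else
    let scored : PySem.Dict Int Int :=
      candidates.foldl (fun sc c =>
        vtables.foldl (fun sc p =>
          if decide (4096 ≤ p.1) && PySem.Set.contains known_addrs (p.1 - c)
          then sc.modify c 0 (· + p.2) else sc) sc) PySem.Dict.empty
    if scored.items = [] then none
    else (PySem.List.max? scored.items (fun q => q.2)).map (fun q => q.1)

-- ===== PORT B =====
-- vtables.get(k, d): first-match lookup in the association list that models the dict
-- (exact: a Python dict never has a duplicated key).
def pyDictGetD (vtables : List (Int × Int)) (k d : Int) : Int :=
  ((vtables.find? (fun p => p.1 == k)).map (fun p => p.2)).getD d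

def infer_slide_alt (vtables : List (Int × Int)) (symbols : List (String × Int)) : Option Int :=
  let known_addrs : List Int :=
    (symbols.filter (fun p =>
      PySem.Str.isIn "vtable" p.1 && PySem.Str.startswith p.1 "__OS_dispatch_")).map (fun p => p.2)
  let distinct_addrs : List Int := PySem.List.dedup known_addrs
  -- st = (best best_score bundled as an Option pair, seen)
  let final : Option (Int × Int) × PySem.Set Int :=
    vtables.foldl (fun (st : Option (Int × Int) × PySem.Set Int) (p : Int × Int) =>
      if p.1 < 4096 then st
      else known_addrs.foldl (fun st (a : Int) =>
        let c := p.1 - a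
        if PySem.Set.contains st.2 c then st
        else
          let score : Int :=
            ((distinct_addrs.filter (fun b => decide (4096 ≤ c + b))).map
              (fun b => pyDictGetD vtables (c + b) 0)).sum
          ((match st.1 with
            | none => some (c, score)
            | some q => if q.2 < score then some (c, score) else some q),
           PySem.Set.add st.2 c)) st) (none, PySem.Set.empty)
  final.1.map (fun q => q.1)

-- ===== PRECONDITION & SPEC =====
-- spec-level description of the inputs (used only by Pre_ and the proofs, not by the ports)
def pvVals (symbols : List (String × Int)) : List Int :=
  (symbols.filter (fun p =>
    PySem.Str.isIn "vtable" p.1 && PySem.Str.startswith p.1 "__OS_dispatch_")).map (fun p => p.2)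

def pvQ (symbols : List (String × Int)) (c : Int) (p : Int × Int) : Bool :=
  decide (4096 ≤ p.1) && (pvVals symbols).contains (p.1 - c)

def pvScore (vtables : List (Int × Int)) (symbols : List (String × Int)) (c : Int) : Int :=
  ((vtables.filter (pvQ symbols c)).map (fun p => p.2)).sum

def pvSeq (vtables : List (Int × Int)) (symbols : List (String × Int)) : List Int :=
  (vtables.filter (fun p => decide (¬ p.1 < 4096))).flatMap
    (fun p => (pvVals symbols).map (fun a => p.1 - a))

def pvCands (vtables : List (Int × Int)) (symbols : List (String × Int)) : List Int :=
  PySem.Set.ofList (pvSeq vtables symbols)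

-- Pre_ excludes only inputs where the maximal score is attained by more than one candidate
-- offset, on which A's Counter.most_common tie-break follows CPython's accidental set-iteration
-- order; the Nodup clauses merely state the dict representation invariant (a Python dict never
-- has a duplicated key), so they exclude no realisable dict input.
def Pre_infer_slide (vtables : List (Int × Int)) (symbols : List (String × Int)) : Prop :=
  (vtables.map Prod.fst).Nodup ∧ (symbols.map Prod.fst).Nodup ∧
  (((pvCands vtables symbols).map (pvScore vtables symbols)).max?.elim 1
    (fun m => ((pvCands vtables symbols).map (pvScore vtables symbols)).count m)) = 1
instance (vtables : List (Int × Int)) (symbols : List (String × Int)) : Decidable (Pre_infer_slide vtables symbols) := by unfold Pre_infer_slide; infer_instance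

def pvWitness_infer_slide : (List (Int × Int)) × (List (String × Int)) :=
  ([(8192, 2)], [("__OS_dispatch_Avtable", 256)])

def Spec_infer_slide (vtables : List (Int × Int)) (symbols : List (String × Int)) (out : Option Int) : Prop := out = infer_slide_alt vtables symbols
instance (vtables : List (Int × Int)) (symbols : List (String × Int)) (out : Option Int) : Decidable (Spec_infer_slide vtables symbols out) := by unfold Spec_infer_slide; infer_instance

-- ===== CLAIM (what is proved, stated in full; the proofs are below) =====
def Claim_equal_infer_slide : Prop := ∀ (vtables : List (Int × Int)) (symbols : List (String × Int)), Dom_infer_slide vtables symbols → Pre_infer_slide vtables symbols → Spec_infer_slide vtables symbols (infer_slide vtables symbols)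

-- ===== LEMMAS AND PROOFS =====

-- the single step both argmax folds take (strict improvement keeps the FIRST maximum)
def pvBstep (vtables : List (Int × Int)) (symbols : List (String × Int))
    (b : Option (Int × Int)) (c : Int) : Option (Int × Int) :=
  match b with
  | none => some (c, pvScore vtables symbols c)
  | some q => if q.2 < pvScore vtables symbols c then some (c, pvScore vtables symbols c) else some q

-- B's candidate step: skip if seen, else score and update the best
def pvGstep (vtables : List (Int × Int)) (symbols : List (String × Int))
    (st : Option (Int × Int) × PySem.Set Int) (c : Int) : Option (Int × Int) × PySem.Set Int :=
  if PySem.Set.contains st.2 c then st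
  else (pvBstep vtables symbols st.1 c, PySem.Set.add st.2 c)

theorem pv_witness_ok :
    Dom_infer_slide pvWitness_infer_slide.1 pvWitness_infer_slide.2 ∧
    Pre_infer_slide pvWitness_infer_slide.1 pvWitness_infer_slide.2 := by
  constructor <;> decide

-- a guarded loop `if p.1 < 4096 then skip else step` is a loop over the filtered list
theorem pv_foldl_guard {γ : Type} (f : γ → (Int × Int) → γ) (l : List (Int × Int)) (init : γ) :
    l.foldl (fun acc p => if p.1 < 4096 then acc else f acc p) init =
      (l.filter (fun p => decide (¬ p.1 < 4096))).foldl f init := by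
  rw [← PySem.List.foldl_if_eq_foldl_filter (fun p => decide (¬ p.1 < 4096)) f l init]
  exact PySem.List.foldl_congr_mem _ _ _ _ (by
    intro acc x _; by_cases h : x.1 < 4096 <;> simp [h])

theorem pv_contains_ofList (xs : List Int) (x : Int) :
    PySem.Set.contains (PySem.Set.ofList xs) x = xs.contains x := by
  simp [PySem.Set.contains]

theorem pv_getD_of_not_contains (sc : PySem.Dict Int Int) (c : Int)
    (h : sc.contains c = false) : sc.getD c 0 = 0 := by
  have : sc.items.find? (fun p => p.1 == c) = none := by
    rw [List.find?_eq_none]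
    intro x hx
    simp [PySem.Dict.contains, List.any_eq_false] at h
    simp [h x.1 x.2 (by simpa using hx)]
  simp [PySem.Dict.getD, PySem.Dict.get?, this]

theorem pv_items_insert_fresh (sc : PySem.Dict Int Int) (c v : Int)
    (h : sc.contains c = false) : (sc.insert c v).items = sc.items ++ [(c, v)] := by
  simp [PySem.Dict.insert, h]

theorem pv_contains_insert (sc : PySem.Dict Int Int) (c c' v : Int) (hne : c' ≠ c) :
    (sc.insert c v).contains c' = sc.contains c' := by
  by_cases h : sc.contains c = true
  · simp only [PySem.Dict.insert, h, if_pos]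
    simp only [PySem.Dict.contains, List.any_map]
    apply PySem.List.any_congr_mem
    intro x _
    by_cases hx : x.1 = c <;> simp [hx, Function.comp]
  · simp only [PySem.Dict.insert, (by simpa using h : sc.contains c = false),
      Bool.false_eq_true, if_false]
    simp [PySem.Dict.contains]
    intro heq
    exact absurd heq.symm hne

-- the dict built by A's filtered-insert loop has exactly the filtered items
theorem pv_known_items (symbols : List (String × Int)) (h : (symbols.map Prod.fst).Nodup) :
    (symbols.foldl (fun d p =>
      if PySem.Str.isIn "vtable" p.1 && PySem.Str.startswith p.1 "__OS_dispatch_"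
      then d.insert p.1 p.2 else d) PySem.Dict.empty).items =
    symbols.filter (fun p =>
      PySem.Str.isIn "vtable" p.1 && PySem.Str.startswith p.1 "__OS_dispatch_") := by
  have hrw := PySem.List.foldl_if_eq_foldl_filter
    (p := fun p : String × Int => PySem.Str.isIn "vtable" p.1 && PySem.Str.startswith p.1 "__OS_dispatch_")
    (f := fun (d : PySem.Dict String Int) (p : String × Int) => d.insert p.1 p.2)
    (l := symbols) (init := PySem.Dict.empty)
  rw [hrw]
  rw [PySem.Dict.items_foldl_insert_fresh _ Prod.fst Prod.snd PySem.Dict.empty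
    (by intro a _; rfl)
    (h.sublist (List.filter_sublist.map Prod.fst))]
  simp [PySem.Dict.empty]

-- A's candidate set is pvCands
theorem pv_cands_eq (vtables : List (Int × Int)) (vals : List Int) :
    vtables.foldl (fun s p =>
      if p.1 < 4096 then s
      else vals.foldl (fun s a => PySem.Set.add s (p.1 - a)) s) PySem.Set.empty =
    PySem.Set.ofList ((vtables.filter (fun p => decide (¬ p.1 < 4096))).flatMap
      (fun p => vals.map (fun a => p.1 - a))) := by
  rw [pv_foldl_guard (fun s p => vals.foldl (fun s a => PySem.Set.add s (p.1 - a)) s)]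
  rw [PySem.Set.ofList_eq_foldl, List.foldl_flatMap]
  apply PySem.List.foldl_congr_mem
  intro acc x _
  rw [List.foldl_map]

-- one candidate's counting loop over the vtable items = one insert of the filtered sum
theorem pv_count_fold (c : Int) (q : Int × Int → Bool) (l : List (Int × Int)) (sc : PySem.Dict Int Int) :
    l.foldl (fun sc p => if q p then sc.modify c 0 (· + p.2) else sc) sc =
      if (l.filter q).isEmpty then sc
      else sc.insert c (sc.getD c 0 + ((l.filter q).map (fun p => p.2)).sum) := by
  induction l generalizing sc with
  | nil => simp
  | cons p t ih =>
    by_cases hq : q p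
    · have hmod : sc.modify c 0 (· + p.2) = sc.insert c (sc.getD c 0 + p.2) := rfl
      simp only [List.foldl_cons, hq, if_pos, List.filter_cons_of_pos hq, List.isEmpty_cons,
        Bool.false_eq_true, if_false, List.map_cons, List.sum_cons]
      rw [hmod, ih]
      by_cases ht : (t.filter q).isEmpty
      · have : t.filter q = [] := by simpa [List.isEmpty_iff] using ht
        simp [this]
      · simp only [ht]
        rw [PySem.Dict.getD_insert, if_pos rfl, PySem.Dict.insert_insert_self]
        simp [add_assoc]
    · have hqf : q p = false := by simpa using hq
      simp only [List.foldl_cons, hqf, Bool.false_eq_true, if_false, List.filter_cons]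
      exact ih sc

-- A's scored dict, built over the (nodup, fresh) candidate list, is the score table
theorem pv_scored_items (vtables : List (Int × Int)) (symbols : List (String × Int))
    (L : List Int) (hL : L.Nodup)
    (hq : ∀ c ∈ L, (vtables.filter (fun p =>
      decide (4096 ≤ p.1) && (pvVals symbols).contains (p.1 - c))).isEmpty = false) :
    ∀ (sc : PySem.Dict Int Int), (∀ c ∈ L, sc.contains c = false) →
    (L.foldl (fun sc c =>
      vtables.foldl (fun sc p =>
        if decide (4096 ≤ p.1) && (pvVals symbols).contains (p.1 - c)
        then sc.modify c 0 (· + p.2) else sc) sc) sc).items =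
      sc.items ++ L.map (fun c => (c, pvScore vtables symbols c)) := by
  induction L with
  | nil => intro sc _; simp
  | cons c t ih =>
    intro sc hfresh
    have hcne := List.nodup_cons.mp hL
    have hcfr : sc.contains c = false := hfresh c List.mem_cons_self
    have hstep : vtables.foldl
        (fun sc p =>
          if decide (4096 ≤ p.1) && (pvVals symbols).contains (p.1 - c)
          then sc.modify c 0 (· + p.2) else sc) sc =
        sc.insert c (pvScore vtables symbols c) := by
      rw [pv_count_fold, if_neg (by rw [hq c List.mem_cons_self]; simp),
        pv_getD_of_not_contains sc c hcfr, zero_add]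
      rfl
    rw [List.foldl_cons, hstep,
      ih hcne.2 (fun x hx => hq x (List.mem_cons_of_mem c hx)) _
        (fun x hx => by
          rw [pv_contains_insert sc c x _ (fun hxe => hcne.1 (hxe ▸ hx))]
          exact hfresh x (List.mem_cons_of_mem c hx)),
      pv_items_insert_fresh sc c _ hcfr]
    simp

-- every candidate is generated by at least one admissible vtable entry, so it gets scored
theorem pv_cands_nonvacuous (vtables : List (Int × Int)) (symbols : List (String × Int)) :
    ∀ c ∈ pvCands vtables symbols, (vtables.filter (pvQ symbols c)).isEmpty = false := by
  intro c hc
  rw [pvCands, PySem.Set.mem_ofList, pvSeq, List.mem_flatMap] at hc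
  obtain ⟨p, hp, hcm⟩ := hc
  rw [List.mem_map] at hcm
  obtain ⟨a, ha, rfl⟩ := hcm
  rw [List.mem_filter] at hp
  have h1 : (4096 : Int) ≤ p.1 := by
    have := hp.2; simp at this; omega
  have hmem : p ∈ vtables.filter (pvQ symbols (p.1 - a)) := by
    rw [List.mem_filter]
    refine ⟨hp.1, ?_⟩
    rw [pvQ]
    have : p.1 - (p.1 - a) = a := by ring
    simp [h1, this]
    exact ha
  simpa [List.isEmpty_iff] using List.ne_nil_of_mem hmem

-- first-match lookup = sum over all entries with that key, when keys are unique
theorem pv_lookup_sum (vtables : List (Int × Int)) (h : (vtables.map Prod.fst).Nodup) (k : Int) :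
    ((vtables.filter (fun p => p.1 == k)).map (fun p => p.2)).sum = pyDictGetD vtables k 0 := by
  rw [pyDictGetD]
  induction vtables with
  | nil => simp
  | cons p t ih =>
    rw [List.map_cons] at h
    have h' := List.nodup_cons.mp h
    by_cases hp : p.1 = k
    · have hfilt : t.filter (fun p => p.1 == k) = [] := by
        apply List.filter_eq_nil_iff.mpr
        intro x hx hbeq
        have hxk : x.1 = k := by simpa using hbeq
        exact h'.1 (List.mem_map.mpr ⟨x, hx, hxk.trans hp.symm⟩)
      simp [hp, hfilt]
    · simp [hp, ih h'.2]

-- a filtered sum over a disjunction of disjoint tests splits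
theorem pv_sum_filter_or (l : List (Int × Int)) (f g : Int × Int → Bool)
    (hdisj : ∀ x ∈ l, ¬(f x = true ∧ g x = true)) :
    ((l.filter (fun x => f x || g x)).map (fun p => p.2)).sum =
      ((l.filter f).map (fun p => p.2)).sum + ((l.filter g).map (fun p => p.2)).sum := by
  induction l with
  | nil => simp
  | cons x t ih =>
    have ht := ih (fun y hy => hdisj y (List.mem_cons_of_mem x hy))
    have hx := hdisj x (List.mem_cons_self)
    by_cases hf : f x
    · have hg : g x = false := by
        cases hgv : g x
        · rfl
        · exact absurd ⟨hf, hgv⟩ hx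
      simp [hf, hg, ht]; omega
    · by_cases hg : g x <;> · simp [hf, hg, ht]; try omega

-- B's lookup-based score equals A's rescanning score (unique vtable keys)
theorem pv_score_eq (vtables : List (Int × Int)) (symbols : List (String × Int))
    (h : (vtables.map Prod.fst).Nodup) (c : Int) :
    ((((PySem.List.dedup (pvVals symbols)).filter (fun b => decide (4096 ≤ c + b))).map
      (fun b => pyDictGetD vtables (c + b) 0)).sum) = pvScore vtables symbols c := by
  have aux : ∀ (A : List Int), A.Nodup →
      ((A.filter (fun b => decide (4096 ≤ c + b))).map (fun b => pyDictGetD vtables (c + b) 0)).sum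
        = ((vtables.filter (fun p => decide (4096 ≤ p.1) && A.contains (p.1 - c))).map
            (fun p => p.2)).sum := by
    intro A
    induction A with
    | nil =>
      intro _
      simp
    | cons b t ih =>
      intro hnd
      have hbt := List.nodup_cons.mp hnd
      have hsplit : ((vtables.filter (fun p =>
          decide (4096 ≤ p.1) && (b :: t).contains (p.1 - c))).map (fun p => p.2)).sum =
          ((vtables.filter (fun p => decide (4096 ≤ p.1) && (p.1 - c == b))).map (fun p => p.2)).sum
          + ((vtables.filter (fun p => decide (4096 ≤ p.1) && t.contains (p.1 - c))).map
              (fun p => p.2)).sum := by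
        rw [List.filter_congr (q := fun p =>
            (decide (4096 ≤ p.1) && (p.1 - c == b)) || (decide (4096 ≤ p.1) && t.contains (p.1 - c)))
          (by intro p _; rw [List.contains_cons, Bool.and_or_distrib_left])]
        apply pv_sum_filter_or
        intro p _ hcontra
        have h1 : 4096 ≤ p.1 ∧ p.1 - c = b := by simpa using hcontra.1
        have h2 : 4096 ≤ p.1 ∧ (p.1 - c) ∈ t := by simpa using hcontra.2
        exact hbt.1 (h1.2 ▸ h2.2)
      have hterm1 : ((vtables.filter (fun p =>
          decide (4096 ≤ p.1) && (p.1 - c == b))).map (fun p => p.2)).sum =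
          (if 4096 ≤ c + b then pyDictGetD vtables (c + b) 0 else 0) := by
        rw [List.filter_congr (q := fun p => decide (4096 ≤ c + b) && (p.1 == c + b))
          (by
            intro p _
            show (decide (4096 ≤ p.1) && (p.1 - c == b)) = (decide (4096 ≤ c + b) && (p.1 == c + b))
            by_cases hpc : p.1 = c + b
            · rw [hpc]
              have hb : c + b - c = b := by ring
              rw [hb]
              simp
            · have hb1 : (p.1 - c == b) = false := by simp; omega
              have hb2 : (p.1 == c + b) = false := by simp; omega
              rw [hb1, hb2, Bool.and_false, Bool.and_false])]
        by_cases hcb : 4096 ≤ c + b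
        · rw [if_pos hcb]
          rw [List.filter_congr (q := fun p => p.1 == c + b)
            (by
              intro p _
              show (decide (4096 ≤ c + b) && (p.1 == c + b)) = (p.1 == c + b)
              simp [hcb])]
          exact pv_lookup_sum vtables h (c + b)
        · rw [if_neg hcb]
          rw [List.filter_congr (q := fun _ => false)
            (by
              intro p _
              show (decide (4096 ≤ c + b) && (p.1 == c + b)) = false
              simp [hcb]), List.filter_false]
          simp
      rw [hsplit, hterm1, ← ih hbt.2, List.filter_cons]
      by_cases hcb : 4096 ≤ c + b <;> simp [hcb]
  rw [pvScore]
  have hcd : ∀ x : Int, (PySem.List.dedup (pvVals symbols)).contains x = (pvVals symbols).contains x :=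
    fun x => pv_contains_ofList (pvVals symbols) x
  rw [aux (PySem.List.dedup (pvVals symbols)) (PySem.Set.nodup_ofList (pvVals symbols))]
  rw [List.filter_congr (q := pvQ symbols c) (by intro p _; rw [pvQ, hcd])]

-- the new elements Set.update appends
theorem pv_update_prefix (s : PySem.Set Int) (t : List Int) :
    ∃ r, PySem.Set.update s t = s ++ r := by
  induction t generalizing s with
  | nil => exact ⟨[], by simp [PySem.Set.update]⟩
  | cons a t ih =>
    have hstep : PySem.Set.update s (a :: t) = PySem.Set.update (PySem.Set.add s a) t := rfl
    by_cases h : a ∈ s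
    · rw [hstep, PySem.Set.add_of_mem h]; exact ih s
    · rw [hstep, PySem.Set.add_of_not_mem h]
      obtain ⟨r, hr⟩ := ih (s ++ [a])
      exact ⟨a :: r, by simp [hr]⟩

-- B's seen-guarded traversal of the raw candidate sequence = plain best-fold over its dedup
theorem pv_flat (vtables : List (Int × Int)) (symbols : List (String × Int)) :
    ∀ (seq : List Int) (b : Option (Int × Int)) (s : PySem.Set Int),
    seq.foldl (pvGstep vtables symbols) (b, s) =
      (((PySem.Set.update s seq).drop s.length).foldl (pvBstep vtables symbols) b,
        PySem.Set.update s seq) := by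
  intro seq
  induction seq with
  | nil =>
    intro b s
    simp [PySem.Set.update, List.drop_length]
  | cons c t ih =>
    intro b s
    have hupd : PySem.Set.update s (c :: t) = PySem.Set.update (PySem.Set.add s c) t := rfl
    rw [List.foldl_cons, hupd]
    by_cases hc : c ∈ s
    · have hcont : PySem.Set.contains s c = true := by simpa [PySem.Set.contains] using hc
      rw [show pvGstep vtables symbols (b, s) c = (b, s) from by
        unfold pvGstep; rw [hcont]; simp, PySem.Set.add_of_mem hc]
      exact ih b s
    · have hcont : PySem.Set.contains s c = false := by simpa [PySem.Set.contains] using hc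
      rw [show pvGstep vtables symbols (b, s) c = (pvBstep vtables symbols b c, s ++ [c]) from by
        unfold pvGstep; rw [hcont]; simp [PySem.Set.add_of_not_mem hc],
        PySem.Set.add_of_not_mem hc]
      rw [ih (pvBstep vtables symbols b c) (s ++ [c])]
      obtain ⟨r, hr⟩ := pv_update_prefix (s ++ [c]) t
      have h1 : (PySem.Set.update (s ++ [c]) t).drop s.length = c :: r := by
        rw [hr, List.append_assoc]
        exact List.drop_left' rfl
      have h2 : (PySem.Set.update (s ++ [c]) t).drop (s ++ [c]).length = r := by
        rw [hr]
        exact List.drop_left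
      rw [h1, h2, List.foldl_cons]

-- each side reduced to the common argmax fold
theorem pv_A_eq (vtables : List (Int × Int)) (symbols : List (String × Int))
    (h2 : (symbols.map Prod.fst).Nodup) :
    infer_slide vtables symbols =
      ((pvCands vtables symbols).foldl (pvBstep vtables symbols) none).map (fun q => q.1) := by
  simp only [infer_slide]
  have hknown := pv_known_items symbols h2
  simp only [PySem.Dict.values, hknown]
  have hv2 : (symbols.filter (fun p =>
      PySem.Str.isIn "vtable" p.1 && PySem.Str.startswith p.1 "__OS_dispatch_")).map
      (fun x => x.2) = pvVals symbols := rfl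
  simp only [hv2]
  have hcands := pv_cands_eq vtables (pvVals symbols)
  have hC : PySem.Set.ofList ((vtables.filter (fun p => decide (¬ p.1 < 4096))).flatMap
      (fun p => (pvVals symbols).map (fun a => p.1 - a))) = pvCands vtables symbols := rfl
  rw [hC] at hcands
  simp only [hcands, pv_contains_ofList]
  have hscored := pv_scored_items vtables symbols (pvCands vtables symbols)
    (PySem.Set.nodup_ofList _) (pv_cands_nonvacuous vtables symbols)
    PySem.Dict.empty (fun c _ => rfl)
  simp only [hscored]
  by_cases hLnil : pvCands vtables symbols = []
  · simp [hLnil]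
  · rw [if_neg hLnil]
    rw [if_neg (by simp [PySem.Dict.empty, hLnil])]
    simp only [PySem.Dict.empty, List.nil_append, PySem.List.max?]
    rw [List.foldl_map]
    congr 1
    apply PySem.List.foldl_congr_mem
    intro acc c _
    cases acc <;> rfl

theorem pv_B_eq (vtables : List (Int × Int)) (symbols : List (String × Int))
    (h1 : (vtables.map Prod.fst).Nodup) :
    infer_slide_alt vtables symbols =
      ((pvCands vtables symbols).foldl (pvBstep vtables symbols) none).map (fun q => q.1) := by
  simp only [infer_slide_alt]
  have hv : (symbols.filter (fun p =>
      PySem.Str.isIn "vtable" p.1 && PySem.Str.startswith p.1 "__OS_dispatch_")).map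
      (fun p => p.2) = pvVals symbols := rfl
  simp only [hv]
  simp only [pv_score_eq vtables symbols h1]
  have hflat := pv_flat vtables symbols (pvSeq vtables symbols) none PySem.Set.empty
  have hupd : PySem.Set.update PySem.Set.empty (pvSeq vtables symbols) = pvCands vtables symbols := rfl
  rw [hupd] at hflat
  simp only [PySem.Set.empty, List.length_nil, List.drop_zero] at hflat
  suffices hmain : (vtables.foldl (fun (st : Option (Int × Int) × PySem.Set Int) (p : Int × Int) =>
      if p.1 < 4096 then st
      else (pvVals symbols).foldl (fun st a =>
        if PySem.Set.contains st.2 (p.1 - a) then st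
        else ((match st.1 with
          | none => some (p.1 - a, pvScore vtables symbols (p.1 - a))
          | some q => if q.2 < pvScore vtables symbols (p.1 - a)
              then some (p.1 - a, pvScore vtables symbols (p.1 - a)) else some q),
          PySem.Set.add st.2 (p.1 - a))) st) (none, PySem.Set.empty)) =
      ((pvSeq vtables symbols).foldl (pvGstep vtables symbols) (none, PySem.Set.empty)) by
    rw [hmain, show (PySem.Set.empty : PySem.Set Int) = ([] : List Int) from rfl, hflat]
  rw [pv_foldl_guard (fun (st : Option (Int × Int) × PySem.Set Int) (p : Int × Int) =>
      (pvVals symbols).foldl (fun st a =>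
        if PySem.Set.contains st.2 (p.1 - a) then st
        else ((match st.1 with
          | none => some (p.1 - a, pvScore vtables symbols (p.1 - a))
          | some q => if q.2 < pvScore vtables symbols (p.1 - a)
              then some (p.1 - a, pvScore vtables symbols (p.1 - a)) else some q),
          PySem.Set.add st.2 (p.1 - a))) st)]
  rw [pvSeq, List.foldl_flatMap]
  apply PySem.List.foldl_congr_mem
  intro acc p _
  rw [List.foldl_map]
  apply PySem.List.foldl_congr_mem
  intro st a _
  simp only [pvGstep, pvBstep]

-- ===== VERDICT (by name: the statement is the Claim_ definition above) =====
theorem infer_slide_spec : Claim_equal_infer_slide := by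
  intro vtables symbols _hdom hpre
  unfold Spec_infer_slide
  rw [pv_A_eq vtables symbols hpre.2.1, pv_B_eq vtables symbols hpre.1]
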